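-- pv_equiv track=rewrite | github.com/hasaninevitable/fyn_shyt | app/services/extractor.py | merge_lines_by_punctuation
-- ===== SOURCE A (Python) =====
-- def merge_lines_by_punctuation(lines):
--     merged = []
--     buffer = []
--
--     for line in lines:
--         stripped = line.strip()
--         if not buffer:
--             buffer.append(stripped)
--         else:
--             if buffer[-1].endswith(('.', '?', '!', ':')):
--                 merged.append(" ".join(buffer))
--                 buffer = [stripped]
--             else:
--                 buffer.append(stripped)
--     if buffer:
--         merged.append(" ".join(buffer))
--     return merged
-- ===== SOURCE B (Python) =====
-- def merge_lines_by_punctuation(lines):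
--     stripped = [l.strip() for l in lines]
--     out = []
--     start = 0
--     for i, s in enumerate(stripped):
--         if s.endswith(('.', '?', '!', ':')):
--             out.append(" ".join(stripped[start:i + 1]))
--             start = i + 1
--     if start < len(stripped):
--         out.append(" ".join(stripped[start:]))
--     return out
-- ===== Notes on version B (the rewrite author's own statement) =====
-- stated objective: alternative
-- what changed: Replaces A's live buffer-of-lines with a precomputed stripped list scanned by index: punctuation boundaries are detected on the current element and groups are emitted as contiguous slices stripped[start:i+1], with a final slice for the tail.
import Mathlib
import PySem

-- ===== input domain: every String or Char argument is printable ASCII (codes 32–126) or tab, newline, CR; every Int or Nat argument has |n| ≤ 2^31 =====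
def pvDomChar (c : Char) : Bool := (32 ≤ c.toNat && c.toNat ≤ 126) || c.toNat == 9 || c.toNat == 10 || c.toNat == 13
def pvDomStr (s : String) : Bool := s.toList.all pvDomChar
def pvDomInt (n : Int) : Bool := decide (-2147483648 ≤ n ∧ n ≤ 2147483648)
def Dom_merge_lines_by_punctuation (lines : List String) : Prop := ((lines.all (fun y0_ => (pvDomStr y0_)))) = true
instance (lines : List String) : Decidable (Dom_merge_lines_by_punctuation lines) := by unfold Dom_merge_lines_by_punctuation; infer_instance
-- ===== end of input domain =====

-- B replaces A's live line buffer with a boundary-index scan over a precomputed stripped list,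
-- emitting contiguous slices; same cost, alternative decomposition.

-- endswith(('.', '?', '!', ':')) — shared by both ports
def pvEndsPunct (s : String) : Bool :=
  PySem.Str.endswith s "." || PySem.Str.endswith s "?" || PySem.Str.endswith s "!" || PySem.Str.endswith s ":"

-- ===== PORT A =====
def mergeStepA (st : List String × List String) (line : String) : List String × List String :=
  let stripped := PySem.Str.strip line
  let merged := st.1
  let buffer := st.2
  if buffer = [] then
    (merged, buffer ++ [stripped])
  else
    if pvEndsPunct buffer.getLast! then
      (merged ++ [PySem.Str.join " " buffer], [stripped])
    else
      (merged, buffer ++ [stripped])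

def merge_lines_by_punctuation (lines : List String) : List String :=
  let st := lines.foldl mergeStepA ([], [])
  if st.2 = [] then st.1 else st.1 ++ [PySem.Str.join " " st.2]

-- ===== PORT B =====
def mergeStepB (stripped : List String) (st : (List String × Nat) × Nat) (s : String) :
    (List String × Nat) × Nat :=
  let out := st.1.1
  let start := st.1.2
  let i := st.2
  if pvEndsPunct s then
    ((out ++ [PySem.Str.join " " (PySem.List.slice stripped (some (start : Int)) (some ((i + 1 : Nat) : Int)))], i + 1), i + 1)
  else
    ((out, start), i + 1)

def merge_lines_by_punctuation_alt (lines : List String) : List String :=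
  let stripped := lines.map PySem.Str.strip
  let st := stripped.foldl (mergeStepB stripped) (([], 0), 0)
  if st.1.2 < stripped.length then
    st.1.1 ++ [PySem.Str.join " " (PySem.List.slice stripped (some (st.1.2 : Int)) none)]
  else
    st.1.1

-- ===== PRECONDITION & SPEC =====
def Spec_merge_lines_by_punctuation (lines : List String) (out : List String) : Prop := out = merge_lines_by_punctuation_alt lines
instance (lines : List String) (out : List String) : Decidable (Spec_merge_lines_by_punctuation lines out) := by unfold Spec_merge_lines_by_punctuation; infer_instance

-- ===== CLAIM (what is proved, stated in full; the proofs are below) =====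
def Claim_equal_merge_lines_by_punctuation : Prop := ∀ (lines : List String), Dom_merge_lines_by_punctuation lines → Spec_merge_lines_by_punctuation lines (merge_lines_by_punctuation lines)

-- ===== LEMMAS AND PROOFS =====

-- grouping where the boundary test is on the CURRENT element (B's shape)
def pvH (pending : List String) : List String → List (List String)
  | [] => if pending = [] then [] else [pending]
  | y :: ys => if pvEndsPunct y then (pending ++ [y]) :: pvH [] ys else pvH (pending ++ [y]) ys

-- grouping where the boundary test is on the LAST buffered element (A's shape)
def pvK (b : List String) : List String → List (List String)
  | [] => [b]
  | y :: ys => if pvEndsPunct b.getLast! then b :: pvK [y] ys else pvK (b ++ [y]) ys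

theorem pvGetLast!_concat (b : List String) (l : String) : (b ++ [l]).getLast! = l := by
  simp

theorem pvK_eq_pvH (xs : List String) : ∀ (pending : List String) (l : String),
    pvK (pending ++ [l]) xs = pvH pending (l :: xs) := by
  induction xs with
  | nil => intro pending l; simp [pvK, pvH]
  | cons y ys ih =>
    intro pending l
    rw [show pvK (pending ++ [l]) (y :: ys) =
        if pvEndsPunct (pending ++ [l]).getLast! then (pending ++ [l]) :: pvK [y] ys
        else pvK ((pending ++ [l]) ++ [y]) ys from rfl]
    rw [show pvH pending (l :: y :: ys) =
        if pvEndsPunct l then (pending ++ [l]) :: pvH [] (y :: ys)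
        else pvH (pending ++ [l]) (y :: ys) from rfl]
    rw [pvGetLast!_concat]
    by_cases h : pvEndsPunct l
    · rw [if_pos h, if_pos h]
      have := ih [] y
      simp only [List.nil_append] at this
      rw [this]
    · rw [if_neg h, if_neg h]
      exact ih (pending ++ [l]) y

def pvFinishA (st : List String × List String) : List String :=
  if st.2 = [] then st.1 else st.1 ++ [PySem.Str.join " " st.2]

theorem pvA_loop (ys : List String) : ∀ (m b : List String) (l : String),
    pvFinishA (ys.foldl mergeStepA (m, b ++ [l])) =
      m ++ (pvK (b ++ [l]) (ys.map PySem.Str.strip)).map (PySem.Str.join " ") := by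
  induction ys with
  | nil => intro m b l; simp [pvFinishA, pvK]
  | cons y ys ih =>
    intro m b l
    have hne : b ++ [l] ≠ [] := by simp
    simp only [List.foldl_cons, List.map_cons]
    rw [show mergeStepA (m, b ++ [l]) y =
        if (b ++ [l]) = [] then (m, (b ++ [l]) ++ [PySem.Str.strip y])
        else if pvEndsPunct (b ++ [l]).getLast! then
          (m ++ [PySem.Str.join " " (b ++ [l])], [PySem.Str.strip y])
        else (m, (b ++ [l]) ++ [PySem.Str.strip y]) from rfl]
    rw [if_neg hne, pvGetLast!_concat]
    rw [show pvK (b ++ [l]) (PySem.Str.strip y :: ys.map PySem.Str.strip) =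
        if pvEndsPunct (b ++ [l]).getLast! then
          (b ++ [l]) :: pvK [PySem.Str.strip y] (ys.map PySem.Str.strip)
        else pvK ((b ++ [l]) ++ [PySem.Str.strip y]) (ys.map PySem.Str.strip) from rfl]
    rw [pvGetLast!_concat]
    by_cases h : pvEndsPunct l
    · rw [if_pos h, if_pos h]
      have hih := ih (m ++ [PySem.Str.join " " (b ++ [l])]) [] (PySem.Str.strip y)
      simp only [List.nil_append] at hih
      rw [hih]
      simp
    · rw [if_neg h, if_neg h]
      have hih := ih m (b ++ [l]) (PySem.Str.strip y)
      rw [hih]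

def pvFinishB (S : List String) (st : (List String × Nat) × Nat) : List String :=
  if st.1.2 < S.length then
    st.1.1 ++ [PySem.Str.join " " (PySem.List.slice S (some (st.1.2 : Int)) none)]
  else
    st.1.1

theorem pvB_loop (S : List String) (xs : List String) :
    ∀ (pending out : List String) (start : Nat),
    S.drop start = pending ++ xs →
    pvFinishB S (xs.foldl (mergeStepB S) ((out, start), start + pending.length)) =
      out ++ (pvH pending xs).map (PySem.Str.join " ") := by
  induction xs with
  | nil =>
    intro pending out start hdrop
    have hlen : S.length - start = pending.length := by
      have := congrArg List.length hdrop; simpa using this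
    simp only [List.foldl_nil, pvFinishB, pvH]
    by_cases h : start < S.length
    · have hp : pending ≠ [] := by
        intro hpe; rw [hpe] at hlen; simp at hlen; omega
      rw [if_pos h, if_neg hp]
      simp [PySem.List.slice_from_natCast, hdrop]
    · have h1 : S.drop start = [] := List.drop_eq_nil_of_le (by omega)
      have hp : pending = [] := by simpa [h1] using hdrop.symm
      rw [if_neg h, hp]
      simp
  | cons y ys ih =>
    intro pending out start hdrop
    simp only [List.foldl_cons, mergeStepB]
    by_cases h : pvEndsPunct y
    · simp only [h, if_true]
      have hslice : PySem.List.slice S (some (start : Int))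
          (some ((start + pending.length + 1 : Nat) : Int)) = pending ++ [y] := by
        rw [PySem.List.slice_natCast, hdrop]
        have : start + pending.length + 1 - start = pending.length + 1 := by omega
        rw [this]
        rw [show pending ++ y :: ys = (pending ++ [y]) ++ ys by simp]
        rw [List.take_append_of_le_length (by simp)]
        simp
      have hdrop' : S.drop (start + pending.length + 1) = [] ++ ys := by
        have : S.drop (start + pending.length + 1) =
            (S.drop start).drop (pending.length + 1) := by
          rw [List.drop_drop]; congr 1; try omega
        rw [this, hdrop]
        simp
      have := ih [] (out ++ [PySem.Str.join " " (pending ++ [y])])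
        (start + pending.length + 1) hdrop'
      simp only [List.length_nil, Nat.add_zero] at this
      rw [hslice]
      rw [this]
      simp [pvH, h]
    · simp only [h, Bool.false_eq_true, if_false]
      have hdrop' : S.drop start = (pending ++ [y]) ++ ys := by simpa using hdrop
      have := ih (pending ++ [y]) out start hdrop'
      simp only [List.length_append, List.length_cons, List.length_nil] at this
      rw [show start + pending.length + 1 = start + (pending.length + 1) by omega]
      simpa [pvH, h] using this

-- ===== VERDICT (by name: the statement is the Claim_ definition above) =====
theorem merge_lines_by_punctuation_spec : Claim_equal_merge_lines_by_punctuation := by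
  intro lines _
  unfold Spec_merge_lines_by_punctuation
  have hB : merge_lines_by_punctuation_alt lines =
      (pvH [] (lines.map PySem.Str.strip)).map (PySem.Str.join " ") := by
    have := pvB_loop (lines.map PySem.Str.strip) (lines.map PySem.Str.strip) [] [] 0 (by simp)
    simpa [merge_lines_by_punctuation_alt, pvFinishB] using this
  cases lines with
  | nil => simp [merge_lines_by_punctuation, hB, pvH]
  | cons x rest =>
    have hstep : mergeStepA ([], []) x = ([], [] ++ [PySem.Str.strip x]) := by
      simp [mergeStepA]
    have hA : merge_lines_by_punctuation (x :: rest) =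
        pvFinishA (rest.foldl mergeStepA ([], [] ++ [PySem.Str.strip x])) := by
      simp [merge_lines_by_punctuation, pvFinishA, hstep]
    rw [hA, pvA_loop rest [] [] (PySem.Str.strip x)]
    rw [pvK_eq_pvH]
    simp [hB, pvH]
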